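-- pv_equiv track=rewrite | github.com/LloydLore/AutoGT | src/autogt/io/json_parser.py | _get_mapped_field
-- ===== SOURCE A (Python) =====
-- from typing import Dict, List, Any, Optional, Union
--
-- def _get_mapped_field(obj: Dict, field_names: List[str]) -> Any:
--     """Get field value using flexible field name mapping."""
--     # Direct key match first
--     for field_name in field_names:
--         if field_name in obj:
--             return obj[field_name]
--
--     # Case-insensitive match
--     obj_keys_lower = {k.lower(): k for k in obj.keys()}
--     for field_name in field_names:
--         if field_name.lower() in obj_keys_lower:
--             actual_key = obj_keys_lower[field_name.lower()]
--             return obj[actual_key]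
--
--     return None
-- ===== SOURCE B (Python) =====
-- from typing import Dict, List, Any, Optional, Union
--
-- def _get_mapped_field(obj: Dict, field_names: List[str]) -> Any:
--     """Get field value using flexible field name mapping (single pass)."""
--     obj_keys_lower = {k.lower(): k for k in obj.keys()}
--     fallback_key = None
--     for field_name in field_names:
--         if field_name in obj:
--             return obj[field_name]
--         if fallback_key is None and field_name.lower() in obj_keys_lower:
--             fallback_key = obj_keys_lower[field_name.lower()]
--     return obj[fallback_key] if fallback_key is not None else None
-- ===== Notes on version B (the rewrite author's own statement) =====
-- stated objective: alternative
-- what changed: Replaces A's two sequential passes over field_names (direct-match pass, then case-insensitive pass) by a single pass that returns direct hits immediately and records the first case-insensitive candidate in a fallback variable used only after the loop.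
import Mathlib
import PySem

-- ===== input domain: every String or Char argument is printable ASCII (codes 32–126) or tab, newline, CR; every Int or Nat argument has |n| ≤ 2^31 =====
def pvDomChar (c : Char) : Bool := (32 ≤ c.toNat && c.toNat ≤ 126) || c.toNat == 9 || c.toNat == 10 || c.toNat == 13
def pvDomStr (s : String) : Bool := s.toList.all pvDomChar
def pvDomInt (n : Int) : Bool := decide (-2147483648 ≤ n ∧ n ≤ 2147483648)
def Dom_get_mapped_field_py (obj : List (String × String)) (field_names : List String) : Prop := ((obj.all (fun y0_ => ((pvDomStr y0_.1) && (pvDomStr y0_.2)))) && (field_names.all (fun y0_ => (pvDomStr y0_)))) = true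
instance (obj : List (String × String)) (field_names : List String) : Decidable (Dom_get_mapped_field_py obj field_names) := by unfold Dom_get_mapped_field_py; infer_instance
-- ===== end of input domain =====

-- B replaces A's two passes over field_names by one pass with a post-loop case-insensitive fallback (alternative decomposition, same cost).

-- ===== PORT A =====
-- A: two passes — direct key match first, then a case-insensitive pass via obj_keys_lower.
def pvA_direct (d : PySem.Dict String String) : List String → Option String
  | [] => none
  | fn :: rest => if d.contains fn then d.get? fn else pvA_direct d rest

def pvA_ci (d : PySem.Dict String String) (lower : PySem.Dict String String) : List String → Option String
  | [] => none
  | fn :: rest =>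
    match lower.get? (PySem.Str.lower fn) with
    | some actual => d.get? actual
    | none => pvA_ci d lower rest

def get_mapped_field_py (obj : List (String × String)) (field_names : List String) : Option String :=
  let d := PySem.Dict.ofList obj
  match pvA_direct d field_names with
  | some v => some v
  | none =>
    let lower := d.keys.foldl (fun m k => m.insert (PySem.Str.lower k) k) PySem.Dict.empty
    pvA_ci d lower field_names

-- ===== PORT B =====
-- B: one pass — direct hits return immediately; the first case-insensitive candidate is
-- recorded in fallback_key (Option String, None = not found) and used only after the loop.
def pvB_loop (d : PySem.Dict String String) (lower : PySem.Dict String String)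
    (fallback : Option String) : List String → Option String
  | [] => match fallback with
          | some k => d.get? k
          | none => none
  | fn :: rest =>
    if d.contains fn then d.get? fn
    else if fallback.isNone && lower.contains (PySem.Str.lower fn) then
      pvB_loop d lower (lower.get? (PySem.Str.lower fn)) rest
    else
      pvB_loop d lower fallback rest

def get_mapped_field_py_alt (obj : List (String × String)) (field_names : List String) : Option String :=
  let d := PySem.Dict.ofList obj
  let lower := d.keys.foldl (fun m k => m.insert (PySem.Str.lower k) k) PySem.Dict.empty
  pvB_loop d lower none field_names

-- ===== PRECONDITION & SPEC =====
def Spec_get_mapped_field_py (obj : List (String × String)) (field_names : List String) (out : Option String) : Prop := out = get_mapped_field_py_alt obj field_names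
instance (obj : List (String × String)) (field_names : List String) (out : Option String) : Decidable (Spec_get_mapped_field_py obj field_names out) := by unfold Spec_get_mapped_field_py; infer_instance

-- ===== CLAIM (what is proved, stated in full; the proofs are below) =====
def Claim_equal_get_mapped_field_py : Prop := ∀ (obj : List (String × String)) (field_names : List String), Dom_get_mapped_field_py obj field_names → Spec_get_mapped_field_py obj field_names (get_mapped_field_py obj field_names)

-- ===== LEMMAS AND PROOFS =====
theorem pvB_loop_eq (d lower : PySem.Dict String String) :
    ∀ (fns : List String) (fb : Option String),
      pvB_loop d lower fb fns =
        match pvA_direct d fns with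
        | some v => some v
        | none =>
          match fb with
          | some k => d.get? k
          | none => pvA_ci d lower fns := by
  intro fns
  induction fns with
  | nil => intro fb; cases fb <;> simp [pvB_loop, pvA_direct, pvA_ci]
  | cons fn rest ih =>
    intro fb
    by_cases hc : d.contains fn = true
    · have hs : (d.get? fn).isSome := by
        rw [← PySem.Dict.contains_eq_isSome_get?]; exact hc
      obtain ⟨v, hv⟩ := Option.isSome_iff_exists.mp hs
      simp [pvB_loop, pvA_direct, hc, hv]
    · have hc' : d.contains fn = false := by simpa using hc
      by_cases hl : lower.contains (PySem.Str.lower fn) = true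
      · cases fb with
        | none =>
          have hks : (lower.get? (PySem.Str.lower fn)).isSome := by
            rw [PySem.Dict.contains_eq_isSome_get?] at hl; exact hl
          obtain ⟨k, hk⟩ := Option.isSome_iff_exists.mp hks
          simp only [pvB_loop, pvA_direct, pvA_ci, hc', hl, hk, Option.isNone_none,
            Bool.true_and, if_true, Bool.false_eq_true, ih]
          cases pvA_direct d rest <;> simp
        | some k0 =>
          simp only [pvB_loop, pvA_direct, hc', Option.isNone_some, Bool.false_and,
            Bool.false_eq_true, ite_false, ih]
      · have hl' : lower.get? (PySem.Str.lower fn) = none := by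
          rw [PySem.Dict.get?_eq_none_iff_contains]; simpa using hl
        cases fb <;>
          simp [pvB_loop, pvA_direct, pvA_ci, hc', hl, hl', ih]

-- ===== VERDICT (by name: the statement is the Claim_ definition above) =====
theorem get_mapped_field_py_spec : Claim_equal_get_mapped_field_py := by
  intro obj fns _
  unfold Spec_get_mapped_field_py get_mapped_field_py get_mapped_field_py_alt
  rw [pvB_loop_eq]
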